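-- pv_equiv track=rewrite | github.com/leandrofariasldf/die-cli | die_cli/tui.py | _trim_art
-- ===== SOURCE A (Python) =====
-- def _trim_art(lines):
--     if not lines:
--         return []
--     src_h = len(lines)
--     src_w = max(len(line) for line in lines)
--     padded = [line.ljust(src_w) for line in lines]
--     rows = [i for i, line in enumerate(padded) if any(ch != " " for ch in line)]
--     if not rows:
--         return []
--     cols = [
--         j
--         for j in range(src_w)
--         if any(padded[i][j] != " " for i in range(src_h))
--     ]
--     if not cols:
--         return []
--     r0, r1 = rows[0], rows[-1]
--     c0, c1 = cols[0], cols[-1]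
--     return [line[c0 : c1 + 1] for line in padded[r0 : r1 + 1]]
-- ===== SOURCE B (Python) =====
-- def _trim_art(lines):
--     # One row-major pass: fold (r0, r1, c0, c1) over the lines, then slice once.
--     box = None
--     for i, line in enumerate(lines):
--         stripped = line.rstrip(' ')
--         if not stripped:
--             continue
--         lead = len(line) - len(line.lstrip(' '))
--         last = len(stripped) - 1
--         if box is None:
--             box = (i, i, lead, last)
--         else:
--             box = (box[0], i, min(box[2], lead), max(box[3], last))
--     if box is None:
--         return []
--     r0, r1, c0, c1 = box
--     return [line.ljust(c1 + 1)[c0 : c1 + 1] for line in lines[r0 : r1 + 1]]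
-- ===== Notes on version B (the rewrite author's own statement) =====
-- stated objective: simpler
-- what changed: Replaces A's padded-copy plus per-column scans (rows list, cols list over range(src_w) x range(src_h)) by a single fold over the lines accumulating the bounding box (r0, r1, c0, c1) from each line's leading-space count and rstrip length, then one slicing pass.
import Mathlib
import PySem

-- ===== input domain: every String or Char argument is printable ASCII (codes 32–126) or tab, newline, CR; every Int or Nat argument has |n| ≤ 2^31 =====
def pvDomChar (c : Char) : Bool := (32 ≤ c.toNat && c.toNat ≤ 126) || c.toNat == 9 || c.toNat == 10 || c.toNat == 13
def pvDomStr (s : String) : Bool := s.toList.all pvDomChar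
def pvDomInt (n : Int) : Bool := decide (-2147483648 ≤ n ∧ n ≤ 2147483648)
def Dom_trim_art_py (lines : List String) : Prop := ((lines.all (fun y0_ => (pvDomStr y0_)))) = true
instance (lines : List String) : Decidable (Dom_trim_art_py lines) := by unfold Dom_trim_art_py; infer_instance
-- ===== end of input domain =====

-- B replaces A's padded copy, rows list and per-column rescans by a single fold that
-- accumulates the bounding box (r0, r1, c0, c1), then slices once.

-- ===== PORT A =====
-- str.ljust(w) with space fill (used by both Pythons): exact hand port.
def pvLjust (l : List Char) (w : Int) : List Char :=
  l ++ List.replicate (w - PySem.List.len l).toNat ' '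

def trim_art_py (lines : List String) : List String :=
  if lines.isEmpty then []
  else
    let L := lines.map String.toList
    let src_h : Int := PySem.List.len L
    match PySem.List.max? (L.map PySem.List.len) (fun x => x) with
    | none => []
    | some src_w =>
      let padded := L.map (fun l => pvLjust l src_w)
      let rows := ((PySem.List.enumerate padded 0).filter
        (fun p => p.2.any (fun ch => ch != ' '))).map (fun p => p.1)
      if hrows : rows = [] then []
      else
        let cols := (PySem.List.pyRange 0 src_w 1).filter (fun j =>
          (PySem.List.pyRange 0 src_h 1).any
            (fun i => PySem.List.pyGetD (PySem.List.pyGetD padded i []) j ' ' != ' '))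
        if hcols : cols = [] then []
        else
          let r0 := rows.head hrows
          let r1 := rows.getLast hrows
          let c0 := cols.head hcols
          let c1 := cols.getLast hcols
          (PySem.List.slice padded (some r0) (some (r1+1))).map
            (fun l => String.mk (PySem.List.slice l (some c0) (some (c1+1))))

-- ===== PORT B =====
-- str.lstrip(' ') / str.rstrip(' '): exact hand ports — strip ONLY the space character.
def pvLstripSp (l : List Char) : List Char := l.dropWhile (fun c => c == ' ')

def pvRstripSp (l : List Char) : List Char := (l.reverse.dropWhile (fun c => c == ' ')).reverse

def pvStep (acc : Option (Int × Int × Int × Int)) (p : Int × List Char) :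
    Option (Int × Int × Int × Int) :=
  let stripped := pvRstripSp p.2
  if stripped.isEmpty then acc
  else
    let lead : Int := PySem.List.len p.2 - PySem.List.len (pvLstripSp p.2)
    let last : Int := PySem.List.len stripped - 1
    match acc with
    | none => some (p.1, p.1, lead, last)
    | some (r0, _, c0, c1) => some (r0, p.1, min c0 lead, max c1 last)

def trim_art_py_alt (lines : List String) : List String :=
  match (PySem.List.enumerate (lines.map String.toList) 0).foldl pvStep none with
  | none => []
  | some (r0, r1, c0, c1) =>
      (PySem.List.slice lines (some r0) (some (r1+1))).map
        (fun s => String.mk (PySem.List.slice (pvLjust s.toList (c1+1)) (some c0) (some (c1+1))))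

-- ===== PRECONDITION & SPEC =====
def Spec_trim_art_py (lines : List String) (out : List String) : Prop := out = trim_art_py_alt lines
instance (lines : List String) (out : List String) : Decidable (Spec_trim_art_py lines out) := by unfold Spec_trim_art_py; infer_instance

-- ===== CLAIM (what is proved, stated in full; the proofs are below) =====
def Claim_equal_trim_art_py : Prop := ∀ (lines : List String), Dom_trim_art_py lines → Spec_trim_art_py lines (trim_art_py lines)

-- ===== LEMMAS AND PROOFS =====

def nbC (l : List Char) : Bool := l.any (fun ch => ch != ' ')

def leadN (l : List Char) : Nat := (l.takeWhile (fun c => c == ' ')).length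

def rlenN (l : List Char) : Nat := (pvRstripSp l).length

def chAt (l : List Char) (j : Nat) : Char := l.getD j ' '

lemma rstrip_nil_iff (l : List Char) : pvRstripSp l = [] ↔ nbC l = false := by
  simp [pvRstripSp, nbC, List.dropWhile_eq_nil_iff, List.any_eq_false]

lemma rstrip_decomp (l : List Char) : ∃ k, l = pvRstripSp l ++ List.replicate k ' ' := by
  refine ⟨(l.reverse.takeWhile (fun c => c == ' ')).length, ?_⟩
  conv_lhs => rw [← l.reverse_reverse, ← List.takeWhile_append_dropWhile (p := fun c => c == ' ') (l := l.reverse)]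
  rw [List.reverse_append]
  congr 1
  have : ∀ x ∈ List.takeWhile (fun c => c == ' ') l.reverse, x = ' ' := by
    intro x hx
    simpa using List.mem_takeWhile_imp hx
  rw [List.eq_replicate_iff]
  exact ⟨by simp, by intro b hb; exact this b (List.mem_reverse.mp hb)⟩

lemma rlen_le_len (l : List Char) : rlenN l ≤ l.length := by
  unfold rlenN pvRstripSp
  simpa using List.length_dropWhile_le (p := fun c => c == ' ') (l := l.reverse)

lemma chAt_append_spaces (a : List Char) (k j : Nat) (hj : a.length ≤ j) :
    chAt (a ++ List.replicate k ' ') j = ' ' := by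
  simp only [chAt, List.getD_eq_getElem?_getD, List.getElem?_append_right hj,
    List.getElem?_replicate]
  split_ifs <;> simp

lemma chAt_ge_rlen (l : List Char) {j : Nat} (hj : rlenN l ≤ j) : chAt l j = ' ' := by
  obtain ⟨k, hk⟩ := rstrip_decomp l
  rw [hk]
  exact chAt_append_spaces _ _ _ (by simpa [rlenN] using hj)

lemma chAt_append_last (a : List Char) (k : Nat) (ha : a ≠ []) :
    chAt (a ++ List.replicate k ' ') (a.length - 1) = a.getLast ha := by
  have hpos : 0 < a.length := List.length_pos_iff.mpr ha
  rw [chAt, List.getD_eq_getElem?_getD, List.getElem?_append_left (by omega),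
    List.getLast_eq_getElem]
  simp [List.getElem?_eq_getElem (by omega : a.length - 1 < a.length)]

lemma chAt_rlast (l : List Char) (h : nbC l = true) : chAt l (rlenN l - 1) ≠ ' ' := by
  have hne : pvRstripSp l ≠ [] := by
    intro hc; rw [(rstrip_nil_iff l).mp hc] at h; simp at h
  have hrev : l.reverse.dropWhile (fun c => c == ' ') ≠ [] := by
    simpa [pvRstripSp] using hne
  obtain ⟨k, hk⟩ := rstrip_decomp l
  have hgl := chAt_append_last (pvRstripSp l) k hne
  rw [← hk] at hgl
  have h2 : (pvRstripSp l).getLast hne = (l.reverse.dropWhile (fun c => c == ' ')).head hrev := by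
    simp [pvRstripSp, List.getLast_reverse]
  rw [rlenN, hgl, h2]
  simpa using List.head_dropWhile_not (fun c => c == ' ') hrev

lemma chAt_lt_lead (l : List Char) {j : Nat} (hj : j < leadN l) : chAt l j = ' ' := by
  induction l generalizing j with
  | nil => simp [leadN] at hj
  | cons c t ih =>
    by_cases hc : c = ' '
    · subst hc
      have hlt : leadN (' ' :: t) = leadN t + 1 := by simp [leadN]
      cases j with
      | zero => simp [chAt]
      | succ j =>
        rw [hlt] at hj
        simpa [chAt] using ih (by omega)
    · have h0 : leadN (c :: t) = 0 := by simp [leadN, hc]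
      rw [h0] at hj; omega

lemma chAt_lead (l : List Char) (h : nbC l = true) : chAt l (leadN l) ≠ ' ' := by
  induction l with
  | nil => simp [nbC] at h
  | cons c t ih =>
    by_cases hc : c = ' '
    · subst hc
      have ht : nbC t = true := by simpa [nbC] using h
      have : leadN (' ' :: t) = leadN t + 1 := by simp [leadN]
      rw [this]
      simpa [chAt] using ih ht
    · have : leadN (c :: t) = 0 := by simp [leadN, hc]
      rw [this]
      simpa [chAt] using hc

lemma nbC_of_chAt {l : List Char} {j : Nat} (h : chAt l j ≠ ' ') : nbC l = true := by
  simp only [chAt, List.getD_eq_getElem?_getD] at h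
  cases hg : l[j]? with
  | none => rw [hg] at h; simp at h
  | some c =>
    rw [hg] at h; simp at h
    have : c ∈ l := List.mem_of_getElem? hg
    simp [nbC, List.any_eq_true]
    exact ⟨c, this, by simpa using h⟩

lemma chAt_ne_bounds {l : List Char} {j : Nat} (h : chAt l j ≠ ' ') :
    leadN l ≤ j ∧ j < rlenN l := by
  constructor
  · by_contra hc; exact h (chAt_lt_lead l (by omega))
  · by_contra hc; exact h (chAt_ge_rlen l (by omega))

lemma lead_lt_rlen (l : List Char) (h : nbC l = true) : leadN l < rlenN l :=
  (chAt_ne_bounds (chAt_lead l h)).2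

lemma leadN_eq_sub (l : List Char) :
    PySem.List.len l - PySem.List.len (pvLstripSp l) = (leadN l : Int) := by
  have := congrArg List.length (List.takeWhile_append_dropWhile (p := fun c => c == ' ') (l := l))
  simp only [List.length_append] at this
  simp [PySem.List.len_eq, pvLstripSp, leadN]
  omega

lemma chAt_ljust (l : List Char) (w : Int) (j : Nat) : chAt (pvLjust l w) j = chAt l j := by
  unfold pvLjust chAt
  simp only [List.getD_eq_getElem?_getD]
  by_cases hj : j < l.length
  · rw [List.getElem?_append_left hj]
  · rw [List.getElem?_append_right (by omega), List.getElem?_replicate,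
      List.getElem?_eq_none (by omega)]
    split_ifs <;> simp

lemma nbC_ljust (l : List Char) (w : Int) : nbC (pvLjust l w) = nbC l := by
  simp [pvLjust, nbC, List.any_append, List.any_replicate]


lemma take_ljust (l : List Char) {v w : Int} (hv : 0 ≤ v) (hvw : v ≤ w) :
    (pvLjust l w).take v.toNat = (pvLjust l v).take v.toNat := by
  unfold pvLjust
  rw [List.take_append, List.take_append, List.take_replicate, List.take_replicate]
  congr 1
  simp [PySem.List.len_eq]
  omega

lemma enumerate_map {α β : Type} (g : α → β) (L : List α) (s : Int) :
    PySem.List.enumerate (L.map g) s = (PySem.List.enumerate L s).map (fun p => (p.1, g p.2)) := by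
  induction L generalizing s with
  | nil => simp [PySem.List.enumerate]
  | cons x t ih => simp [PySem.List.enumerate_cons, ih]

-- the filtered enumeration both sides effectively traverse

def pvF (L : List (List Char)) : List (Int × List Char) :=
  (PySem.List.enumerate L 0).filter (fun p => nbC p.2)

lemma pvF_padded (L : List (List Char)) (w : Int) :
    (PySem.List.enumerate (L.map (fun l => pvLjust l w)) 0).filter (fun p => nbC p.2)
      = (pvF L).map (fun p => (p.1, pvLjust p.2 w)) := by
  rw [enumerate_map, List.filter_map]
  unfold pvF
  congr 1
  apply List.filter_congr
  intro p _
  simp [nbC_ljust]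


lemma head_le_of_pairwise {l : List Int} (h : l.Pairwise (· < ·)) {x : Int}
    (hx : x ∈ l) (hne : l ≠ []) : l.head hne ≤ x := by
  cases l with
  | nil => simp at hne
  | cons a t =>
    rcases List.mem_cons.mp hx with rfl | hx
    · simp
    · exact le_of_lt ((List.pairwise_cons.mp h).1 x hx)

lemma le_getLast_of_pairwise {l : List Int} (h : l.Pairwise (· < ·)) {x : Int}
    (hx : x ∈ l) (hne : l ≠ []) : x ≤ l.getLast hne := by
  induction l with
  | nil => simp at hne
  | cons a t ih =>
    cases t with
    | nil => simp at hx; simp [hx]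
    | cons b u =>
      have htne : b :: u ≠ [] := by simp
      rw [List.getLast_cons htne]
      rcases List.mem_cons.mp hx with rfl | hx2
      · exact le_of_lt ((List.pairwise_cons.mp h).1 _ (List.getLast_mem htne))
      · exact ih (List.pairwise_cons.mp h).2 hx2 htne

lemma pvStep_blank {acc : Option (Int × Int × Int × Int)} {i : Int} {x : List Char}
    (hx : nbC x = false) : pvStep acc (i, x) = acc := by
  unfold pvStep
  simp [List.isEmpty_iff, (rstrip_nil_iff x).mpr hx]

lemma pvStep_nb {acc : Option (Int × Int × Int × Int)} {i : Int} {x : List Char}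
    (hx : nbC x = true) : pvStep acc (i, x) =
      match acc with
      | none => some (i, i, (leadN x : Int), (rlenN x : Int) - 1)
      | some (r0, _, c0, c1) =>
          some (r0, i, min c0 (leadN x : Int), max c1 ((rlenN x : Int) - 1)) := by
  unfold pvStep
  have hne : ¬ (pvRstripSp x).isEmpty := by
    simp [List.isEmpty_iff]
    intro hc; rw [(rstrip_nil_iff x).mp hc] at hx; simp at hx
  simp only [hne, if_neg, Bool.false_eq_true, not_false_iff]
  rw [leadN_eq_sub]
  simp [PySem.List.len_eq, rlenN]

def pvGood (L : List (List Char)) (acc : Option (Int × Int × Int × Int)) : Prop :=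
  match acc with
  | none => pvF L = []
  | some (r0, r1, c0, c1) =>
      (∃ p0, (pvF L).head? = some p0 ∧ r0 = p0.1) ∧
      (∃ pn, (pvF L).getLast? = some pn ∧ r1 = pn.1) ∧
      (∃ p ∈ pvF L, c0 = (leadN p.2 : Int)) ∧ (∀ p ∈ pvF L, c0 ≤ (leadN p.2 : Int)) ∧
      (∃ p ∈ pvF L, c1 = (rlenN p.2 : Int) - 1) ∧ (∀ p ∈ pvF L, (rlenN p.2 : Int) - 1 ≤ c1)

lemma pvF_append_one (L : List (List Char)) (x : List Char) :
    pvF (L ++ [x]) = pvF L ++ (if nbC x then [((L.length : Int), x)] else []) := by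
  unfold pvF
  rw [PySem.List.enumerate_append, List.filter_append]
  congr 1
  simp [PySem.List.enumerate_cons, PySem.List.enumerate]
  split_ifs with h <;> simp [PySem.List.enumerate, List.filter, h]

lemma fold_good (L : List (List Char)) :
    pvGood L ((PySem.List.enumerate L 0).foldl pvStep none) := by
  induction L using List.reverseRecOn with
  | nil => simp [pvGood, pvF, PySem.List.enumerate]
  | append_singleton L x ih =>
    rw [PySem.List.enumerate_append, List.foldl_append]
    have henum1 : PySem.List.enumerate [x] (0 + (L.length : Int)) = [((L.length : Int), x)] := by
      simp [PySem.List.enumerate_cons, PySem.List.enumerate]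
    rw [henum1]
    simp only [List.foldl_cons, List.foldl_nil]
    by_cases hx : nbC x
    · rw [pvStep_nb hx]
      rcases hacc : ((PySem.List.enumerate L 0).foldl pvStep none) with _ | ⟨r0, r1, c0, c1⟩
      · rw [hacc] at ih
        have hF : pvF L = [] := ih
        simp only [pvGood, pvF_append_one, hF, hx, if_pos, List.nil_append]
        exact ⟨⟨_, rfl, rfl⟩, ⟨_, rfl, rfl⟩, ⟨((L.length : Int), x), by simp, rfl⟩,
          by intro p hp; simp at hp; subst hp; simp,
          ⟨((L.length : Int), x), by simp, rfl⟩, by intro p hp; simp at hp; subst hp; simp⟩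
      · rw [hacc] at ih
        obtain ⟨⟨p0, hh, hr0⟩, ⟨pn, hl, hr1⟩, ⟨q0, hq0, hc0⟩, hc0all, ⟨q1, hq1, hc1⟩, hc1all⟩ := ih
        have hFne : pvF L ≠ [] := by intro hc; rw [hc] at hh; simp at hh
        have hFa : pvF (L ++ [x]) = pvF L ++ [((L.length : Int), x)] := by
          rw [pvF_append_one, if_pos hx]
        refine ⟨⟨p0, ?_, hr0⟩, ⟨((L.length : Int), x), ?_, rfl⟩, ?_, ?_, ?_, ?_⟩
        · rw [hFa, List.head?_append_of_ne_nil _ hFne] <;> exact hh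
        · rw [hFa, List.getLast?_concat]
        · rcases min_choice c0 ((leadN x : Int)) with hm | hm
          · exact ⟨q0, by rw [hFa]; exact List.mem_append_left _ hq0, by rw [hm, hc0]⟩
          · exact ⟨((L.length : Int), x), by rw [hFa]; simp, by rw [hm]⟩
        · intro p hp
          rw [hFa] at hp
          rcases List.mem_append.mp hp with hp | hp
          · exact le_trans (min_le_left _ _) (hc0all p hp)
          · simp at hp; subst hp; exact min_le_right _ _
        · rcases max_choice c1 ((rlenN x : Int) - 1) with hm | hm
          · exact ⟨q1, by rw [hFa]; exact List.mem_append_left _ hq1, by rw [hm, hc1]⟩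
          · exact ⟨((L.length : Int), x), by rw [hFa]; simp, by rw [hm]⟩
        · intro p hp
          rw [hFa] at hp
          rcases List.mem_append.mp hp with hp | hp
          · exact le_trans (hc1all p hp) (le_max_left _ _)
          · simp at hp; subst hp; exact le_max_right _ _
    · rw [pvStep_blank (by simpa using hx)]
      have hFa : pvF (L ++ [x]) = pvF L := by
        rw [pvF_append_one, if_neg hx, List.append_nil]
      rcases hacc : ((PySem.List.enumerate L 0).foldl pvStep none) with _ | ⟨r0, r1, c0, c1⟩ <;>
        rw [hacc] at ih
      · simpa [pvGood, hFa] using ih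
      · simpa [pvGood, hFa] using ih

lemma pvF_mem {L : List (List Char)} {p : Int × List Char} (hp : p ∈ pvF L) :
    p.2 ∈ L ∧ nbC p.2 = true := by
  unfold pvF at hp
  have h2 := List.of_mem_filter hp
  have h1 := List.mem_of_mem_filter hp
  rw [PySem.List.mem_enumerate_iff] at h1
  obtain ⟨k, hk, rfl⟩ := h1
  exact ⟨List.getElem_mem hk, by simpa using h2⟩

lemma mem_pvF_of {L : List (List Char)} {l : List Char} (hl : l ∈ L) (hnb : nbC l = true) :
    ∃ p ∈ pvF L, p.2 = l := by
  obtain ⟨k, hk, rfl⟩ := List.mem_iff_getElem.mp hl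
  refine ⟨((k : Int), L[k]), ?_, rfl⟩
  unfold pvF
  refine List.mem_filter.mpr ⟨?_, by simpa using hnb⟩
  rw [PySem.List.mem_enumerate_iff]
  exact ⟨k, hk, by simp⟩

lemma any_range_getD (xs : List (List Char)) (f : List Char → Bool) :
    (PySem.List.pyRange 0 (xs.length : Int) 1).any (fun i => f (PySem.List.pyGetD xs i [])) = xs.any f := by
  conv_rhs => rw [← PySem.List.map_pyGetD_pyRange_zero' xs []]
  rw [List.any_map]
  rfl

lemma slice_map {α β : Type} (f : α → β) (xs : List α) (a? b? : Option Int) :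
    PySem.List.slice (xs.map f) a? b? = (PySem.List.slice xs a? b?).map f := by
  simp [PySem.List.slice, List.map_take, List.map_drop]

lemma slice_ljust_eq (l : List Char) {c0 c1 w : Int} (h0 : 0 ≤ c0) (h1 : 0 ≤ c1)
    (hw : c1 + 1 ≤ w) :
    PySem.List.slice (pvLjust l w) (some c0) (some (c1 + 1))
      = PySem.List.slice (pvLjust l (c1 + 1)) (some c0) (some (c1 + 1)) := by
  rw [PySem.List.slice_toNat _ h0 (by omega), PySem.List.slice_toNat _ h0 (by omega),
    ← List.drop_take, ← List.drop_take, take_ljust l (by omega) hw]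

theorem main_eq (lines : List String) : trim_art_py lines = trim_art_py_alt lines := by
  by_cases hnil : lines = []
  · subst hnil
    simp [trim_art_py, trim_art_py_alt, PySem.List.enumerate]
  -- notation
  set L := lines.map String.toList with hL
  have hLne : L ≠ [] := by simpa [hL] using hnil
  -- the maximum width
  rcases hmax : PySem.List.max? (L.map PySem.List.len) (fun x => x) with _ | w
  · exact absurd (by simpa using (PySem.List.max?_eq_none_iff _ _).mp hmax) hLne
  have hwlen : ∀ l ∈ L, (l.length : Int) ≤ w := by
    intro l hl
    have := PySem.List.max?_isMax hmax (PySem.List.len l) (List.mem_map_of_mem hl)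
    simpa [PySem.List.len_eq] using this
  have h0w : 0 ≤ w := by
    have hmem := PySem.List.max?_mem hmax
    obtain ⟨l, _, rfl⟩ := List.mem_map.mp hmem
    simp [PySem.List.len_eq]
  -- rows in terms of pvF
  have hrows_eq :
      ((PySem.List.enumerate (L.map (fun l => pvLjust l w)) 0).filter
        (fun p => p.2.any (fun ch => ch != ' '))).map (fun p => p.1)
      = (pvF L).map (fun p => p.1) := by
    have : (fun (p : Int × List Char) => p.2.any (fun ch => ch != ' ')) = (fun p => nbC p.2) := rfl
    rw [this, pvF_padded, List.map_map]
    rfl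
  -- B's fold
  have hgood := fold_good L
  rcases hacc : ((PySem.List.enumerate L 0).foldl pvStep none) with _ | ⟨r0, r1, c0, c1⟩ <;>
    rw [hacc] at hgood
  · -- all lines blank: both return []
    have hF : pvF L = [] := hgood
    simp only [trim_art_py, trim_art_py_alt]
    rw [if_neg (by simpa [List.isEmpty_iff]), ← hL, hmax, hacc]
    simp only
    rw [dif_pos (by rw [hrows_eq, hF]; simp)]
  · obtain ⟨⟨p0, hh, hr0⟩, ⟨pn, hlast, hr1⟩, ⟨q0, hq0, hc0⟩, hc0all, ⟨q1, hq1, hc1⟩, hc1all⟩ := hgood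
    have hFne : pvF L ≠ [] := by intro hc; rw [hc] at hh; simp at hh
    obtain ⟨hq0L, hq0nb⟩ := pvF_mem hq0
    obtain ⟨hq1L, hq1nb⟩ := pvF_mem hq1
    have hlead0 := lead_lt_rlen q0.2 hq0nb
    have hlead1 := lead_lt_rlen q1.2 hq1nb
    have hrl0 := rlen_le_len q0.2
    have hrl1 := rlen_le_len q1.2
    have hw0 := hwlen q0.2 hq0L
    have hw1 := hwlen q1.2 hq1L
    have h0c0 : 0 ≤ c0 := by rw [hc0]; positivity
    have hc0w : c0 < w := by rw [hc0]; omega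
    have h0c1 : 0 ≤ c1 := by rw [hc1]; omega
    have hc1w : c1 < w := by rw [hc1]; omega
    -- characterize the column predicate
    have hgetd : ∀ (j : Int), 0 ≤ j → ∀ l : List Char,
        PySem.List.pyGetD (pvLjust l w) j ' ' = chAt l j.toNat := by
      intro j hj l
      rw [PySem.List.pyGetD_of_nonneg _ _ hj]
      exact chAt_ljust l w j.toNat
    have hP : ∀ j : Int, 0 ≤ j →
        (((PySem.List.pyRange 0 (PySem.List.len L) 1).any
          (fun i => PySem.List.pyGetD (PySem.List.pyGetD (L.map fun l => pvLjust l w) i []) j ' ' != ' ')) = true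
          ↔ ∃ l ∈ L, chAt l j.toNat ≠ ' ') := by
      intro j hj
      have hlen : PySem.List.len L = (((L.map fun l => pvLjust l w)).length : Int) := by
        simp [PySem.List.len_eq]
      rw [hlen, any_range_getD (L.map fun l => pvLjust l w)
        (fun row => PySem.List.pyGetD row j ' ' != ' '), List.any_map]
      simp only [List.any_eq_true, Function.comp]
      constructor
      · rintro ⟨l, hl, hb⟩
        exact ⟨l, hl, by simpa [hgetd j hj l] using hb⟩
      · rintro ⟨l, hl, hb⟩
        exact ⟨l, hl, by simpa [hgetd j hj l] using hb⟩
    -- the cols list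
    have hmemcols : ∀ j : Int, j ∈ (PySem.List.pyRange 0 w 1).filter (fun j =>
        (PySem.List.pyRange 0 (PySem.List.len L) 1).any
          (fun i => PySem.List.pyGetD (PySem.List.pyGetD (L.map fun l => pvLjust l w) i []) j ' ' != ' '))
        ↔ (0 ≤ j ∧ j < w ∧ ∃ l ∈ L, chAt l j.toNat ≠ ' ') := by
      intro j
      rw [List.mem_filter, PySem.List.mem_pyRange_one]
      constructor
      · rintro ⟨⟨h1, h2⟩, h3⟩
        exact ⟨h1, h2, (hP j h1).mp h3⟩
      · rintro ⟨h1, h2, h3⟩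
        exact ⟨⟨h1, h2⟩, (hP j h1).mpr h3⟩
    have hc0mem : c0 ∈ (PySem.List.pyRange 0 w 1).filter (fun j =>
        (PySem.List.pyRange 0 (PySem.List.len L) 1).any
          (fun i => PySem.List.pyGetD (PySem.List.pyGetD (L.map fun l => pvLjust l w) i []) j ' ' != ' ')) := by
      rw [hmemcols]
      refine ⟨h0c0, hc0w, q0.2, hq0L, ?_⟩
      have : c0.toNat = leadN q0.2 := by rw [hc0]; simp
      rw [this]
      exact chAt_lead q0.2 hq0nb
    have hc1mem : c1 ∈ (PySem.List.pyRange 0 w 1).filter (fun j =>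
        (PySem.List.pyRange 0 (PySem.List.len L) 1).any
          (fun i => PySem.List.pyGetD (PySem.List.pyGetD (L.map fun l => pvLjust l w) i []) j ' ' != ' ')) := by
      rw [hmemcols]
      refine ⟨h0c1, hc1w, q1.2, hq1L, ?_⟩
      have : c1.toNat = rlenN q1.2 - 1 := by rw [hc1]; omega
      rw [this]
      exact chAt_rlast q1.2 hq1nb
    have hcne : (PySem.List.pyRange 0 w 1).filter (fun j =>
        (PySem.List.pyRange 0 (PySem.List.len L) 1).any
          (fun i => PySem.List.pyGetD (PySem.List.pyGetD (L.map fun l => pvLjust l w) i []) j ' ' != ' ')) ≠ [] :=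
      List.ne_nil_of_mem hc0mem
    have hbnd : ∀ j ∈ (PySem.List.pyRange 0 w 1).filter (fun j =>
        (PySem.List.pyRange 0 (PySem.List.len L) 1).any
          (fun i => PySem.List.pyGetD (PySem.List.pyGetD (L.map fun l => pvLjust l w) i []) j ' ' != ' ')),
        c0 ≤ j ∧ j ≤ c1 := by
      intro j hj
      rw [hmemcols] at hj
      obtain ⟨hj0, hjw, l, hlL, hlne⟩ := hj
      obtain ⟨hle, hlt⟩ := chAt_ne_bounds hlne
      obtain ⟨p, hpF, hpl⟩ := mem_pvF_of hlL (nbC_of_chAt hlne)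
      have h1 := hc0all p hpF
      have h2 := hc1all p hpF
      rw [hpl] at h1 h2
      omega
    have hpw : ((PySem.List.pyRange 0 w 1).filter (fun j =>
        (PySem.List.pyRange 0 (PySem.List.len L) 1).any
          (fun i => PySem.List.pyGetD (PySem.List.pyGetD (L.map fun l => pvLjust l w) i []) j ' ' != ' '))).Pairwise (· < ·) :=
      List.Pairwise.sublist List.filter_sublist (PySem.List.pairwise_lt_pyRange_one 0 w)
    have hchead : ∀ h, ((PySem.List.pyRange 0 w 1).filter (fun j =>
        (PySem.List.pyRange 0 (PySem.List.len L) 1).any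
          (fun i => PySem.List.pyGetD (PySem.List.pyGetD (L.map fun l => pvLjust l w) i []) j ' ' != ' '))).head h = c0 := by
      intro h
      exact le_antisymm (head_le_of_pairwise hpw hc0mem h) ((hbnd _ (List.head_mem h)).1)
    have hclast : ∀ h, ((PySem.List.pyRange 0 w 1).filter (fun j =>
        (PySem.List.pyRange 0 (PySem.List.len L) 1).any
          (fun i => PySem.List.pyGetD (PySem.List.pyGetD (L.map fun l => pvLjust l w) i []) j ' ' != ' '))).getLast h = c1 := by
      intro h
      exact le_antisymm ((hbnd _ (List.getLast_mem h)).2) (le_getLast_of_pairwise hpw hc1mem h)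
    -- rows head / getLast
    have hrowsne : (pvF L).map (fun p => p.1) ≠ [] := by simpa using hFne
    have hrhead : ∀ h, ((pvF L).map (fun p => p.1)).head h = r0 := by
      intro h
      have h1 := List.head?_eq_head (l := (pvF L).map (fun p => p.1)) h
      rw [List.head?_map, hh] at h1
      rw [hr0]
      exact (Option.some.inj h1).symm
    have hrlast : ∀ h, ((pvF L).map (fun p => p.1)).getLast h = r1 := by
      intro h
      have h1 := List.getLast?_eq_getLast (l := (pvF L).map (fun p => p.1)) h
      rw [List.getLast?_map, hlast] at h1
      rw [hr1]
      exact (Option.some.inj h1).symm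
    -- unfold both sides
    simp only [trim_art_py, trim_art_py_alt]
    rw [if_neg (by simpa [List.isEmpty_iff]), ← hL, hmax, hacc]
    simp only
    rw [hrows_eq, dif_neg hrowsne, dif_neg hcne, hrhead, hrlast, hchead, hclast]
    -- align the two renderings
    rw [hL, List.map_map, slice_map, List.map_map]
    apply List.map_congr_left
    intro s _
    simp only [Function.comp]
    exact congrArg String.mk (slice_ljust_eq s.toList h0c0 h0c1 (by omega))

-- ===== VERDICT (by name: the statement is the Claim_ definition above) =====
theorem trim_art_py_spec : Claim_equal_trim_art_py := by
  intro lines _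
  unfold Spec_trim_art_py
  exact main_eq lines
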